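-- pv_equiv track=rewrite | github.com/yassine-turki/Polytechnique_Courses | CSE202/TD_3/search.py | cost_ternary_search_real
-- ===== SOURCE A (Python) =====
-- def cost_ternary_search_real(A,v):
--     if len(A)==0: return 0
--     n=len(A)
--     l=0
--     r=n-1
--     cost=0
--     while l<=r:
--         part1 = l + ((r -l) // 3)
--         part2 = r - ((r - l)// 3)
--         if v == A[part1]:
--             return cost+1
--         if v == A[part2]:
--             cost+=2
--             return cost +2
--         if v < A[part1]:
--             r = part1 -1
--             cost+=3
--         elif v > A[part2]:
--             l = part2 + 1
--             cost+=4
--         else: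
--             l = part1 + 1
--             r = part2 -1
--             cost+=4
--     return cost
-- ===== SOURCE B (Python) =====
-- def cost_ternary_search_real(A, v):
--     # Recursive (non-accumulator) decomposition: cost is summed on the way out;
--     # the empty list falls out of the l > r base case.
--     def rec(l, r):
--         if l > r:
--             return 0
--         third = (r - l) // 3
--         part1 = l + third
--         part2 = r - third
--         if v == A[part1]:
--             return 1
--         if v == A[part2]:
--             return 4
--         if v < A[part1]:
--             return 3 + rec(l, part1 - 1)
--         elif v > A[part2]:
--             return 4 + rec(part2 + 1, r)
--         else:
--             return 4 + rec(part1 + 1, part2 - 1)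
--     return rec(0, len(A) - 1)
-- ===== Notes on version B (the rewrite author's own statement) =====
-- stated objective: alternative
-- what changed: Replaces the iterative loop with a mutable cost accumulator by a pure recursive helper that returns the remaining cost additively (base case l > r yields 0, subsuming the empty-list special case; the found-at-part2 cost+=2 then return cost+2 collapses to a single 4).
import Mathlib
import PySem

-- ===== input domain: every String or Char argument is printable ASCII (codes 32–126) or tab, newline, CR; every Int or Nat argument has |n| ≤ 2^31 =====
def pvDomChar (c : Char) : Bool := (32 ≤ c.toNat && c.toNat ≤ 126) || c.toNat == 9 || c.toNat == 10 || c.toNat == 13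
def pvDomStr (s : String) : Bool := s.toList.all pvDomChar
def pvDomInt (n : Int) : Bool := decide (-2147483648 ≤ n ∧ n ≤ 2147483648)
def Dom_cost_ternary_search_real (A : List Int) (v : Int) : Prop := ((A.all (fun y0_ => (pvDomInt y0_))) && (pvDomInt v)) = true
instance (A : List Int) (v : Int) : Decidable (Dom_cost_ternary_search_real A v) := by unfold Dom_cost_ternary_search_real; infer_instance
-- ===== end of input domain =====

-- B replaces A's iterative loop with a mutable cost accumulator by a pure recursive
-- helper returning the remaining cost additively (alternative decomposition, same cost).


-- ===== PORT A =====
-- A's while loop, one constructor of `fuel` per iteration (fuel = len(A) at the entry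
-- call always suffices: the window r-l+1 starts at len(A) and strictly shrinks each
-- iteration, so the `fuel = 0` fallback is never reached from the entry call; likewise
-- indices part1/part2 are then always in range, so pyGetD's default is never used).
def pvLoopA (A : List Int) (v : Int) : Nat → Int → Int → Int → Int
  | 0, _, _, cost => cost
  | fuel + 1, l, r, cost =>
    if l ≤ r then
      if v = PySem.List.pyGetD A (l + PySem.Int.floordiv (r - l) 3) 0 then cost + 1
      else if v = PySem.List.pyGetD A (r - PySem.Int.floordiv (r - l) 3) 0 then (cost + 2) + 2
      else if v < PySem.List.pyGetD A (l + PySem.Int.floordiv (r - l) 3) 0 then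
        pvLoopA A v fuel l (l + PySem.Int.floordiv (r - l) 3 - 1) (cost + 3)
      else if PySem.List.pyGetD A (r - PySem.Int.floordiv (r - l) 3) 0 < v then
        pvLoopA A v fuel (r - PySem.Int.floordiv (r - l) 3 + 1) r (cost + 4)
      else
        pvLoopA A v fuel (l + PySem.Int.floordiv (r - l) 3 + 1) (r - PySem.Int.floordiv (r - l) 3 - 1) (cost + 4)
    else cost

def cost_ternary_search_real (A : List Int) (v : Int) : Int :=
  if A.length = 0 then 0
  else pvLoopA A v A.length 0 ((A.length : Int) - 1) 0

-- ===== PORT B =====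
-- B's helper rec: no accumulator, the cost of the remaining search is returned
-- additively; same fuel discipline (never exhausted from the entry call).
def pvRecB (A : List Int) (v : Int) : Nat → Int → Int → Int
  | 0, _, _ => 0
  | fuel + 1, l, r =>
    if l > r then 0
    else
      let third := PySem.Int.floordiv (r - l) 3
      let part1 := l + third
      let part2 := r - third
      if v = PySem.List.pyGetD A part1 0 then 1
      else if v = PySem.List.pyGetD A part2 0 then 4
      else if v < PySem.List.pyGetD A part1 0 then 3 + pvRecB A v fuel l (part1 - 1)
      else if PySem.List.pyGetD A part2 0 < v then 4 + pvRecB A v fuel (part2 + 1) r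
      else 4 + pvRecB A v fuel (part1 + 1) (part2 - 1)

def cost_ternary_search_real_alt (A : List Int) (v : Int) : Int :=
  pvRecB A v A.length 0 ((A.length : Int) - 1)

-- ===== PRECONDITION & SPEC =====
def Spec_cost_ternary_search_real (A : List Int) (v : Int) (out : Int) : Prop := out = cost_ternary_search_real_alt A v
instance (A : List Int) (v : Int) (out : Int) : Decidable (Spec_cost_ternary_search_real A v out) := by unfold Spec_cost_ternary_search_real; infer_instance

-- ===== CLAIM (what is proved, stated in full; the proofs are below) =====
def Claim_equal_cost_ternary_search_real : Prop := ∀ (A : List Int) (v : Int), Dom_cost_ternary_search_real A v → Spec_cost_ternary_search_real A v (cost_ternary_search_real A v)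

-- ===== LEMMAS AND PROOFS =====

-- A's loop with accumulator `cost` equals `cost` plus B's additively computed cost
-- (for the same fuel; both entries call with fuel = len(A)).
theorem pvLoopA_eq_add (A : List Int) (v : Int) :
    ∀ (fuel : Nat) (l r cost : Int),
      pvLoopA A v fuel l r cost = cost + pvRecB A v fuel l r := by
  intro fuel
  induction fuel with
  | zero => intro l r cost; simp [pvLoopA, pvRecB]
  | succ fuel ih =>
    intro l r cost
    rw [pvLoopA, pvRecB]
    by_cases hlr : l ≤ r
    · rw [if_pos hlr, if_neg (by omega : ¬ l > r)]
      simp only []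
      by_cases h1 : v = PySem.List.pyGetD A (l + PySem.Int.floordiv (r - l) 3) 0
      · rw [if_pos h1, if_pos h1]
      · rw [if_neg h1, if_neg h1]
        by_cases h2 : v = PySem.List.pyGetD A (r - PySem.Int.floordiv (r - l) 3) 0
        · rw [if_pos h2, if_pos h2]; ring
        · rw [if_neg h2, if_neg h2]
          by_cases h3 : v < PySem.List.pyGetD A (l + PySem.Int.floordiv (r - l) 3) 0
          · rw [if_pos h3, if_pos h3, ih]; ring
          · rw [if_neg h3, if_neg h3]
            by_cases h4 : PySem.List.pyGetD A (r - PySem.Int.floordiv (r - l) 3) 0 < v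
            · rw [if_pos h4, if_pos h4, ih]; ring
            · rw [if_neg h4, if_neg h4, ih]; ring
    · rw [if_neg hlr, if_pos (by omega : l > r)]; ring

-- ===== VERDICT (by name: the statement is the Claim_ definition above) =====
theorem cost_ternary_search_real_spec : Claim_equal_cost_ternary_search_real := by
  intro A v _
  unfold Spec_cost_ternary_search_real cost_ternary_search_real cost_ternary_search_real_alt
  by_cases hA : A.length = 0
  · rw [if_pos hA, hA]
    simp [pvRecB]
  · rw [if_neg hA, pvLoopA_eq_add]
    ring
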